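-- pv_equiv track=rewrite | github.com/alinashabaeva/word_order_modeling | src/WO_extraction.py | determine_word_order
-- ===== SOURCE A (Python) =====
-- def determine_word_order(subject_pos, verb_pos, object_pos):
--     """
--     Determine word order based on positions of S, V, O
--     Returns one of: SVO, SOV, VSO, VOS, OSV, OVS
--     """
--     positions = [
--         ('S', subject_pos),
--         ('V', verb_pos),
--         ('O', object_pos)
--     ]
--
--     positions.sort(key=lambda x: x[1]) # sort by position
--
--     order = ''.join([pos[0] for pos in positions])
--     return order
-- ===== SOURCE B (Python) =====
-- def determine_word_order(subject_pos, verb_pos, object_pos):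
--     """
--     Determine word order based on positions of S, V, O
--     Returns one of: SVO, SOV, VSO, VOS, OSV, OVS
--     """
--     # decide by direct comparison; <= breaks ties toward S < V < O,
--     # exactly like a stable sort of [S, V, O]
--     if subject_pos <= verb_pos:
--         if subject_pos <= object_pos:
--             return "SVO" if verb_pos <= object_pos else "SOV"
--         else:
--             return "OSV"
--     else:
--         if verb_pos <= object_pos:
--             return "VSO" if subject_pos <= object_pos else "VOS"
--         else:
--             return "OVS"
-- ===== Notes on version B (the rewrite author's own statement) =====
-- stated objective: idiomatic
-- what changed: Replaces the build-list / stable-sort-by-position / join pipeline with a direct nested-comparison dispatch that returns one of the six permutation strings.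
import Mathlib
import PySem

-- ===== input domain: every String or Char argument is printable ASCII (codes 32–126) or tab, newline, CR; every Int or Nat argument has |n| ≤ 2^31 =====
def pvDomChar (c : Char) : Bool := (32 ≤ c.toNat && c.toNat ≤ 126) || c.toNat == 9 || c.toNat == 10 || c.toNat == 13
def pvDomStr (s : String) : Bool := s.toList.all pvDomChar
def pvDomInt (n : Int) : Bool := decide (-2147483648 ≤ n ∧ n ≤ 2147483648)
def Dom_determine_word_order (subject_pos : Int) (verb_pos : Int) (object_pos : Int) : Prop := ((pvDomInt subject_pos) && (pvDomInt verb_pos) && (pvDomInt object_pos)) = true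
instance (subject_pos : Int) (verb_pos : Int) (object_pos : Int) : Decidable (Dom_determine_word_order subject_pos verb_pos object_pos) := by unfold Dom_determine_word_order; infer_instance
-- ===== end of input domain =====

-- B replaces A's build-list / stable-sort / join pipeline with a direct nested-comparison dispatch (idiomatic; same O(1) cost).


-- ===== PORT A =====
def determine_word_order (subject_pos : Int) (verb_pos : Int) (object_pos : Int) : String :=
  let positions : List (String × Int) := [("S", subject_pos), ("V", verb_pos), ("O", object_pos)]
  let positions := PySem.List.sorted positions (fun x => x.2) false
  let order := PySem.Str.join "" (positions.map (fun pos => pos.1))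
  order

-- ===== PORT B =====
def determine_word_order_alt (subject_pos : Int) (verb_pos : Int) (object_pos : Int) : String :=
  if subject_pos ≤ verb_pos then
    if subject_pos ≤ object_pos then
      if verb_pos ≤ object_pos then "SVO" else "SOV"
    else "OSV"
  else
    if verb_pos ≤ object_pos then
      if subject_pos ≤ object_pos then "VSO" else "VOS"
    else "OVS"

-- ===== PRECONDITION & SPEC =====
def Spec_determine_word_order (subject_pos : Int) (verb_pos : Int) (object_pos : Int) (out : String) : Prop := out = determine_word_order_alt subject_pos verb_pos object_pos
instance (subject_pos : Int) (verb_pos : Int) (object_pos : Int) (out : String) : Decidable (Spec_determine_word_order subject_pos verb_pos object_pos out) := by unfold Spec_determine_word_order; infer_instance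

-- ===== CLAIM (what is proved, stated in full; the proofs are below) =====
def Claim_equal_determine_word_order : Prop := ∀ (subject_pos : Int) (verb_pos : Int) (object_pos : Int), Dom_determine_word_order subject_pos verb_pos object_pos → Spec_determine_word_order subject_pos verb_pos object_pos (determine_word_order subject_pos verb_pos object_pos)

-- ===== LEMMAS AND PROOFS =====

-- ===== VERDICT (by name: the statement is the Claim_ definition above) =====
theorem determine_word_order_spec : Claim_equal_determine_word_order := by
  intro s v o _
  unfold Spec_determine_word_order determine_word_order determine_word_order_alt
  simp only [PySem.List.sorted, PySem.List.insertBy, List.foldl]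
  split_ifs <;> simp_all [PySem.List.insertBy] <;> (try split_ifs) <;> (try simp_all) <;> first | omega | decide
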